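-- pv_equiv track=rewrite | github.com/YuneeeM/Python_Algorithm | 프로그래머스/lv0/0918/0923-23.py | solution
-- ===== SOURCE A (Python) =====
-- from collections import deque
--
-- def solution(numbers, k):
--     answer = 0
--     numbers = deque(numbers)
--     for i in range(k):
--         if i == 0:
--             answer = numbers.popleft()
--             numbers.append(answer)
--         else:
--             cur1 = numbers.popleft()
--             cur2 = numbers.popleft()
--             numbers.append(cur1)
--             numbers.append(cur2)
--             answer = cur2
--
--     return answer
-- ===== SOURCE B (Python) =====
-- def solution(numbers, k):
--     # O(1) closed form: after the first pass the holder is numbers[0]; each later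
--     # pass advances the item by two positions around the circle.
--     if k <= 0:
--         return 0
--     return numbers[(2 * (k - 1)) % len(numbers)]
-- ===== Notes on version B (the rewrite author's own statement) =====
-- stated objective: faster
-- what changed: Replaces the O(k) deque-rotation simulation with the closed-form index numbers[(2*(k-1)) % len(numbers)] (0 when k <= 0).
import Mathlib
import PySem

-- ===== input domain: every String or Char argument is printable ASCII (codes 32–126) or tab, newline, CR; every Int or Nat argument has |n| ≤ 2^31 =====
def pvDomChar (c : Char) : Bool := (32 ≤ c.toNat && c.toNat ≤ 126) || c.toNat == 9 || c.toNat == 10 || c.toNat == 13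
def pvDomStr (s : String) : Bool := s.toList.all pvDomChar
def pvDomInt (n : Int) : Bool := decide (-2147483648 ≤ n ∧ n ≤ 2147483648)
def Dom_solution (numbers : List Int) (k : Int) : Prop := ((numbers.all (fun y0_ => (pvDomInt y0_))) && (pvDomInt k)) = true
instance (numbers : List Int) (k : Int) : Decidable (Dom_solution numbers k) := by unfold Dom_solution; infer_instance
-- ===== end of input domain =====

-- B replaces A's O(k) deque-rotation simulation by the O(1) closed form
-- numbers[(2*(k-1)) % len(numbers)] (0 when k <= 0); proved equal on Pre_.


-- ===== PORT A =====
-- one iteration of A's for-loop: state = (answer, deque); the empty-match arms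
-- are where Python's popleft raises IndexError (excluded by Pre_solution)
def solutionStep (s : Int × List Int) (i : Int) : Int × List Int :=
  if i = 0 then
    match s.2 with
    | a :: rest => (a, rest ++ [a])
    | [] => s
  else
    match s.2 with
    | c1 :: c2 :: rest => (c2, rest ++ [c1, c2])
    | _ => s

def solution (numbers : List Int) (k : Int) : Int :=
  ((PySem.List.pyRange 0 k 1).foldl solutionStep (0, numbers)).1

-- ===== PORT B =====
-- closed form; getD's default is unreachable inside Pre_ (index is in range)
def solution_alt (numbers : List Int) (k : Int) : Int :=
  if k ≤ 0 then 0
  else (PySem.List.pyGet? numbers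
          (PySem.Int.mod (2 * (k - 1)) (numbers.length : Int))).getD 0

-- ===== PRECONDITION & SPEC =====
-- Pre_ excludes exactly the inputs where A raises IndexError: k ≥ 1 with an
-- empty list, or k ≥ 2 with a one-element list (popping two from one element).
def Pre_solution (numbers : List Int) (k : Int) : Prop :=
  k ≤ 0 ∨ (numbers ≠ [] ∧ (k = 1 ∨ 2 ≤ numbers.length))
instance (numbers : List Int) (k : Int) : Decidable (Pre_solution numbers k) := by
  unfold Pre_solution; infer_instance
def pvWitness_solution : List Int × Int := ([10, 20, 30, 40], 5)

def Spec_solution (numbers : List Int) (k : Int) (out : Int) : Prop := out = solution_alt numbers k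
instance (numbers : List Int) (k : Int) (out : Int) : Decidable (Spec_solution numbers k out) := by unfold Spec_solution; infer_instance

-- ===== CLAIM (what is proved, stated in full; the proofs are below) =====
def Claim_equal_solution : Prop := ∀ (numbers : List Int) (k : Int), Dom_solution numbers k → Pre_solution numbers k → Spec_solution numbers k (solution numbers k)

-- ===== LEMMAS AND PROOFS =====

-- deque.popleft+append is a one-step rotation; two of them a two-step rotation
theorem rotate_one_cons (c1 : Int) (rest : List Int) :
    (c1 :: rest).rotate 1 = rest ++ [c1] := by
  rw [show (1 : Nat) = 0 + 1 from rfl, List.rotate_cons_succ, List.rotate_zero]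

theorem rotate_two_cons (c1 c2 : Int) (rest : List Int) :
    (c1 :: c2 :: rest).rotate 2 = rest ++ [c1, c2] := by
  rw [show (2 : Nat) = 1 + 1 from rfl, List.rotate_cons_succ, List.cons_append,
      List.rotate_cons_succ, List.rotate_zero]
  simp

-- loop invariant for A on a list of length ≥ 2: after m ≥ 1 iterations the
-- answer is the head of numbers rotated 2*(m-1) and the deque is numbers
-- rotated 2*m-1
theorem solution_loop_inv (numbers : List Int) (hn : numbers ≠ [])
    (m : Nat) (hm : 1 ≤ m) (hm2 : 2 ≤ m → 2 ≤ numbers.length) :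
    (PySem.List.pyRange 0 (m : Int) 1).foldl solutionStep (0, numbers)
      = ((numbers.rotate (2 * (m - 1))).headD 0, numbers.rotate (2 * m - 1)) := by
  induction m with
  | zero => omega
  | succ m ih =>
    rcases Nat.eq_or_lt_of_le hm with h1 | h1
    · -- first iteration
      obtain ⟨a, rest, rfl⟩ : ∃ a rest, numbers = a :: rest := by
        rcases numbers with _ | ⟨a, rest⟩
        · simp at hn
        · exact ⟨a, rest, rfl⟩
      simp only [← h1]
      rw [show ((1 : Nat) : Int) = 0 + 1 by norm_num, PySem.List.pyRange_one_singleton]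
      simp [solutionStep]
    · -- later iterations
      have hm' : 1 ≤ m := by omega
      have hlen2 : 2 ≤ numbers.length := hm2 (by omega)
      rw [show ((m + 1 : Nat) : Int) = (m : Int) + 1 by push_cast; ring,
          PySem.List.pyRange_one_succ_right (Int.natCast_nonneg m),
          List.foldl_append, ih hm' (fun _ => hlen2)]
      have hlen : 2 ≤ (numbers.rotate (2 * m - 1)).length := by
        rwa [List.length_rotate]
      obtain ⟨c1, c2, rest, hr⟩ : ∃ c1 c2 rest,
          numbers.rotate (2 * m - 1) = c1 :: c2 :: rest := by
        rcases h : numbers.rotate (2 * m - 1) with _ | ⟨c1, _ | ⟨c2, rest⟩⟩ <;>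
          rw [h] at hlen <;> simp at hlen
        exact ⟨c1, c2, rest, rfl⟩
      have hstep : solutionStep
          ((numbers.rotate (2 * (m - 1))).headD 0, numbers.rotate (2 * m - 1)) (m : Int)
          = (c2, rest ++ [c1, c2]) := by
        simp only [solutionStep, hr]
        rw [if_neg (show ¬((m : Int) = 0) by
          have : (1 : Int) ≤ (m : Int) := by exact_mod_cast hm'
          omega)]
      rw [List.foldl_cons, List.foldl_nil, hstep, Prod.mk.injEq]
      constructor
      · -- answer: head of rotate (2 * m)
        have : numbers.rotate (2 * (m + 1 - 1))
            = (numbers.rotate (2 * m - 1)).rotate 1 := by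
          rw [List.rotate_rotate]; congr 1; omega
        rw [this, hr, rotate_one_cons]
        simp
      · -- deque: rotate (2 * (m + 1) - 1)
        have : numbers.rotate (2 * (m + 1) - 1)
            = (numbers.rotate (2 * m - 1)).rotate 2 := by
          rw [List.rotate_rotate]; congr 1; omega
        rw [this, hr, rotate_two_cons]

-- head of a rotation, as an indexed element
theorem headD_rotate (numbers : List Int) (t : Nat) (hn : numbers ≠ []) :
    (numbers.rotate t).headD 0 = (numbers[t % numbers.length]?).getD 0 := by
  have hlen : 0 < numbers.length := List.length_pos_iff.mpr hn
  rw [List.headD_eq_head?, List.head?_eq_getElem?, List.getElem?_rotate hlen]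
  simp

theorem solution_spec' (numbers : List Int) (k : Int)
    (hpre : Pre_solution numbers k) : solution numbers k = solution_alt numbers k := by
  by_cases hk0 : k ≤ 0
  · -- loop body never runs, B returns 0
    simp [solution, solution_alt, PySem.List.pyRange_one_eq_nil hk0, if_pos hk0]
  rcases hpre with hk | ⟨hne, hk⟩
  · omega
  have hk1 : 1 ≤ k := by omega
  lift k to Nat using (by omega : 0 ≤ k) with m
  have hm1 : 1 ≤ m := by exact_mod_cast hk1
  have hm2 : 2 ≤ m → 2 ≤ numbers.length := by
    intro h2
    rcases hk with h | h
    · have : m = 1 := by exact_mod_cast h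
      omega
    · exact h
  rw [solution, solution_loop_inv numbers hne m hm1 hm2,
      headD_rotate numbers (2 * (m - 1)) hne]
  rw [solution_alt, if_neg hk0]
  rw [show 2 * ((m : Int) - 1) = ((2 * (m - 1) : Nat) : Int) by push_cast; omega]
  rw [PySem.Int.mod_natCast, PySem.List.pyGet?_natCast]

-- ===== VERDICT (by name: the statement is the Claim_ definition above) =====
theorem solution_spec : Claim_equal_solution := by
  intro numbers k _ hpre
  exact solution_spec' numbers k hpre
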